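-- pv_equiv track=rewrite | github.com/hsjsjsj009/my-code | Archive-Code/sumoflist.py | sum_of_list
-- ===== SOURCE A (Python) =====
-- def sum_of_list(lst):
--         if len(lst)>0:
--             if type(lst[0]) == int :
--                 return lst[0]+sum_of_list(lst[1:])
--             elif type(lst[0]) == list:
--                 return sum_of_list(lst[0])
--         else :
--             return 0
-- ===== SOURCE B (Python) =====
-- def sum_of_list(lst):
--     total = 0
--     for x in lst:
--         total += x
--     return total
-- ===== Notes on version B (the rewrite author's own statement) =====
-- stated objective: faster
-- what changed: Replaced recursion with per-step slice copies (lst[1:]) by a single iterative accumulator loop over the list.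
import Mathlib
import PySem

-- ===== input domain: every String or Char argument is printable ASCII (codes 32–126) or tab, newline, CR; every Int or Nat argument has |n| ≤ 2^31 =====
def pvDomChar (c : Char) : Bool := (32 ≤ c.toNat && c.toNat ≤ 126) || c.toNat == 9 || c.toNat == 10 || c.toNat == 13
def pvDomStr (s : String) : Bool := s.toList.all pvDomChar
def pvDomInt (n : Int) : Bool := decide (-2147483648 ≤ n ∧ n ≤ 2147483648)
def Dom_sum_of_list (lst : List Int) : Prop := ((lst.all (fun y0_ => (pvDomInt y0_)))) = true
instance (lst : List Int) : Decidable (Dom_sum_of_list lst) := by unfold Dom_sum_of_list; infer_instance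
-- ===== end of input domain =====

-- B replaces A's slice-copying recursion by one iterative accumulator pass (faster, O(n) vs O(n^2)).


-- ===== PORT A =====
-- A recurses: head + sum_of_list(tail slice); the 'elif type is list' branch is
-- unreachable for List Int inputs, and the empty list returns 0.
def sum_of_list (lst : List Int) : Int :=
  match lst with
  | [] => 0
  | h :: t => h + sum_of_list t

-- ===== PORT B =====
-- B: iterative accumulator loop ('total += x' over the list) = a left fold.
def sum_of_list_alt (lst : List Int) : Int :=
  lst.foldl (fun total x => total + x) 0

-- ===== PRECONDITION & SPEC =====
def Spec_sum_of_list (lst : List Int) (out : Int) : Prop := out = sum_of_list_alt lst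
instance (lst : List Int) (out : Int) : Decidable (Spec_sum_of_list lst out) := by unfold Spec_sum_of_list; infer_instance

-- ===== CLAIM (what is proved, stated in full; the proofs are below) =====
def Claim_equal_sum_of_list : Prop := ∀ (lst : List Int), Dom_sum_of_list lst → Spec_sum_of_list lst (sum_of_list lst)

-- ===== LEMMAS AND PROOFS =====
theorem foldl_acc_sum (lst : List Int) (acc : Int) :
    lst.foldl (fun total x => total + x) acc = acc + sum_of_list lst := by
  induction lst generalizing acc with
  | nil => simp [sum_of_list]
  | cons h t ih => simp [List.foldl, sum_of_list, ih (acc + h)]; ring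

-- ===== VERDICT (by name: the statement is the Claim_ definition above) =====
theorem sum_of_list_spec : Claim_equal_sum_of_list := by
  intro lst _
  unfold Spec_sum_of_list sum_of_list_alt
  simp [foldl_acc_sum]
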